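-- pv_equiv track=rewrite | github.com/Snagnar/Factompiler | dsl_compiler/src/layout/planner.py | _is_position_free
-- ===== SOURCE A (Python) =====
-- from typing import Any, Dict, Optional, List, Tuple
--
-- def _is_position_free(
--
--     tile_x: int,
--     tile_y: int,
--     footprint: Tuple[int, int],
--     occupied_tiles: Dict[Tuple[int, int], str],
-- ) -> bool:
--     """Check if a position is completely free."""
--     width, height = footprint
--
--     for dx in range(width):
--         for dy in range(height):
--             tile = (tile_x + dx, tile_y + dy)
--             if tile in occupied_tiles:
--                 return False
--
--     return True
-- ===== SOURCE B (Python) =====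
-- def _is_position_free(
--     tile_x,
--     tile_y,
--     footprint,
--     occupied_tiles,
-- ):
--     """Check if a position is completely free (scan the occupied set, not the region)."""
--     width, height = footprint
--     return not any(
--         tile_x <= x < tile_x + width and tile_y <= y < tile_y + height
--         for (x, y) in occupied_tiles
--     )
-- ===== Notes on version B (the rewrite author's own statement) =====
-- stated objective: faster
-- what changed: B scans the occupied-tile keys once with a half-open rectangle membership test instead of enumerating every (dx,dy) cell of the footprint and probing the dict.
import Mathlib
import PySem

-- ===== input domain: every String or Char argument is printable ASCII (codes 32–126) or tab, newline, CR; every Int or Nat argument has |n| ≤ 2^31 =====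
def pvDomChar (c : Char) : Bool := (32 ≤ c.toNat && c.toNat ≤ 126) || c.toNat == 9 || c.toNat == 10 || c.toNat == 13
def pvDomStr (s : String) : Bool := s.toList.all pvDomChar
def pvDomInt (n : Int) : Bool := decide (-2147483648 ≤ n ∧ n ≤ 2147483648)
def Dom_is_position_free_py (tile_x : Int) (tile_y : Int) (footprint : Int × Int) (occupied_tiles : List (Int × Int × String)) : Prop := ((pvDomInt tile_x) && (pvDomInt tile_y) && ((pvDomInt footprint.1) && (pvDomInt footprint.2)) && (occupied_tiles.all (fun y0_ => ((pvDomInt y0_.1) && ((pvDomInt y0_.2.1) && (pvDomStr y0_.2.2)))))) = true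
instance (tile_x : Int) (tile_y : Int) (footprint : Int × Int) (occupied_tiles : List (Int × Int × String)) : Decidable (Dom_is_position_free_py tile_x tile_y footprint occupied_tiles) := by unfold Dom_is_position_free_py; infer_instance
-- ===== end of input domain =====

-- B replaces A's per-cell scan of the footprint rectangle with a single pass over the
-- occupied-tile keys using a half-open rectangle test (objective: faster, O(|occ|) vs O(w*h)).

-- ===== PORT A =====
-- 'tile in occupied_tiles': key membership in the association list (key = (t.1, t.2.1))
def aContains (occ : List (Int × Int × String)) (kx ky : Int) : Bool :=
  occ.any (fun t => t.1 == kx && t.2.1 == ky)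

-- 'for dy in range(height): if tile in occupied_tiles: return False'
def aLoopDy (tile_x tile_y dx : Int) (occ : List (Int × Int × String)) : List Int → Bool
  | [] => true
  | dy :: rest =>
    if aContains occ (tile_x + dx) (tile_y + dy) then false
    else aLoopDy tile_x tile_y dx occ rest

-- outer 'for dx in range(width)' loop; an inner 'return False' propagates out
def aLoopDx (tile_x tile_y height : Int) (occ : List (Int × Int × String)) : List Int → Bool
  | [] => true
  | dx :: rest =>
    if aLoopDy tile_x tile_y dx occ (PySem.List.pyRange 0 height 1) then
      aLoopDx tile_x tile_y height occ rest
    else false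

def is_position_free_py (tile_x : Int) (tile_y : Int) (footprint : Int × Int) (occupied_tiles : List (Int × Int × String)) : Bool :=
  aLoopDx tile_x tile_y footprint.2 occupied_tiles (PySem.List.pyRange 0 footprint.1 1)

-- ===== PORT B =====
-- not any(tile_x <= x < tile_x + width and tile_y <= y < tile_y + height for (x, y) in occupied_tiles)
def is_position_free_py_alt (tile_x : Int) (tile_y : Int) (footprint : Int × Int) (occupied_tiles : List (Int × Int × String)) : Bool :=
  !(occupied_tiles.any (fun t =>
      decide (tile_x ≤ t.1) && decide (t.1 < tile_x + footprint.1) &&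
      decide (tile_y ≤ t.2.1) && decide (t.2.1 < tile_y + footprint.2)))

-- ===== PRECONDITION & SPEC =====
def Spec_is_position_free_py (tile_x : Int) (tile_y : Int) (footprint : Int × Int) (occupied_tiles : List (Int × Int × String)) (out : Bool) : Prop := out = is_position_free_py_alt tile_x tile_y footprint occupied_tiles
instance (tile_x : Int) (tile_y : Int) (footprint : Int × Int) (occupied_tiles : List (Int × Int × String)) (out : Bool) : Decidable (Spec_is_position_free_py tile_x tile_y footprint occupied_tiles out) := by unfold Spec_is_position_free_py; infer_instance

-- ===== CLAIM (what is proved, stated in full; the proofs are below) =====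
def Claim_equal_is_position_free_py : Prop := ∀ (tile_x : Int) (tile_y : Int) (footprint : Int × Int) (occupied_tiles : List (Int × Int × String)), Dom_is_position_free_py tile_x tile_y footprint occupied_tiles → Spec_is_position_free_py tile_x tile_y footprint occupied_tiles (is_position_free_py tile_x tile_y footprint occupied_tiles)

-- ===== LEMMAS AND PROOFS =====

theorem aLoopDy_eq_not_any (tx ty dx : Int) (occ : List (Int × Int × String)) (l : List Int) :
    aLoopDy tx ty dx occ l = !(l.any (fun dy => aContains occ (tx + dx) (ty + dy))) := by
  induction l with
  | nil => rfl
  | cons dy rest ih =>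
    simp only [aLoopDy, List.any_cons]
    by_cases h : aContains occ (tx + dx) (ty + dy) = true
    · simp [h]
    · simp [h, ih]

theorem aLoopDx_eq_not_any (tx ty h : Int) (occ : List (Int × Int × String)) (l : List Int) :
    aLoopDx tx ty h occ l
      = !(l.any (fun dx => (PySem.List.pyRange 0 h 1).any
            (fun dy => aContains occ (tx + dx) (ty + dy)))) := by
  induction l with
  | nil => rfl
  | cons dx rest ih =>
    simp only [aLoopDx, List.any_cons, aLoopDy_eq_not_any]
    by_cases hc : (PySem.List.pyRange 0 h 1).any (fun dy => aContains occ (tx + dx) (ty + dy)) = true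
    · simp [hc]
    · simp [hc, ih]

theorem exists_cell_iff (tx ty w h : Int) (occ : List (Int × Int × String)) :
    ((PySem.List.pyRange 0 w 1).any (fun dx => (PySem.List.pyRange 0 h 1).any
        (fun dy => aContains occ (tx + dx) (ty + dy))))
      = occ.any (fun t =>
          decide (tx ≤ t.1) && decide (t.1 < tx + w) &&
          decide (ty ≤ t.2.1) && decide (t.2.1 < ty + h)) := by
  rw [Bool.eq_iff_iff]
  simp only [List.any_eq_true, PySem.List.mem_pyRange_one, aContains, Bool.and_eq_true,
    beq_iff_eq, decide_eq_true_eq]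
  constructor
  · rintro ⟨dx, ⟨h0x, hxw⟩, dy, ⟨h0y, hyh⟩, t, ht, h1, h2⟩
    exact ⟨t, ht, ⟨⟨by omega, by omega⟩, by omega⟩, by omega⟩
  · rintro ⟨t, ht, ⟨⟨h1, h2⟩, h3⟩, h4⟩
    exact ⟨t.1 - tx, ⟨by omega, by omega⟩, t.2.1 - ty, ⟨by omega, by omega⟩,
      t, ht, by omega, by omega⟩

-- ===== VERDICT (by name: the statement is the Claim_ definition above) =====
theorem is_position_free_py_spec : Claim_equal_is_position_free_py := by
  intro tx ty fp occ _
  unfold Spec_is_position_free_py is_position_free_py is_position_free_py_alt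
  rw [aLoopDx_eq_not_any, exists_cell_iff]
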